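-- pv_equiv track=rewrite | github.com/anthonywritescode/aoc2023 | day14/part2.py | _compute_line
-- ===== SOURCE A (Python) =====
-- from typing import Sequence
--
-- def _compute_line(s: Sequence[str]) -> str:
--     line = list(s)
--     length = len(s)
--     target = 0
--     looking = 0
--     while target < length:
--         if line[target] == 'O':
--             target += 1
--         elif line[target] == '#':
--             target += 1
--         elif line[target] == '.':
--             looking = max(looking, target + 1)
--             for looking in range(looking, length):
--                 if line[looking] == '#':
--                     target = looking + 1
--                     break
--                 elif line[looking] == 'O':
--                     line[target], line[looking] = line[looking], line[target]
--                     target += 1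
--                     looking += 1
--                     break
--             else:
--                 break
--         else:
--             target += 1
--
--     return ''.join(line)
-- ===== SOURCE B (Python) =====
-- def _compute_line(s):
--     out = []
--     line = list(s)
--     while True:
--         i = 0
--         while i < len(line) and line[i] != '#':
--             i += 1
--         seg = line[:i]
--         n = sum(1 for c in seg if c == 'O')
--         for c in seg:
--             if c == 'O' or c == '.':
--                 if n > 0:
--                     out.append('O')
--                     n -= 1
--                 else:
--                     out.append('.')
--             else:
--                 out.append(c)
--         if i == len(line):
--             break
--         out.append('#')
--         line = line[i + 1:]
--     return ''.join(out)
-- ===== Notes on version B (the rewrite author's own statement) =====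
-- stated objective: simpler
-- what changed: A's in-place two-pointer loop (target/looking indices with swaps and a resumable inner scan) is replaced by splitting the sequence element-wise at '#' separators and rewriting each segment's 'O'/'.' slots as the segment's O-count of 'O's followed by '.'s, leaving other elements in place.
import Mathlib
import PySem

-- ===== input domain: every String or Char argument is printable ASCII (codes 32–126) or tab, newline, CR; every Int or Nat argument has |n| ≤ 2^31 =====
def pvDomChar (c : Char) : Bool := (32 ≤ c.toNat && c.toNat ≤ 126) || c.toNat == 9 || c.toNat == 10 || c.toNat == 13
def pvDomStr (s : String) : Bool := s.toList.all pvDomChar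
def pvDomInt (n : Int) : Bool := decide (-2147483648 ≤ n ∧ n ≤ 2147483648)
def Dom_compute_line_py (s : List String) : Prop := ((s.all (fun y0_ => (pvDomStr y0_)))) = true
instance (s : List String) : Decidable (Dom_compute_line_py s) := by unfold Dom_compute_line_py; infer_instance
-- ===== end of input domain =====

-- B replaces A's two-pointer in-place swapping loop by an element-wise segment split:
-- each '#'-free segment keeps its non-'O'/'.' elements in place and rewrites its
-- 'O'/'.' slots as the segment's O-count of 'O's followed by '.'s (objective: simpler).


-- ===== PORT A =====
-- the inner `for looking in range(looking, length)` scan: returns the index at which it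
-- breaks and whether it broke on '#' (true) or on 'O' (false); none = for-else (no break)
def scanA (line : List String) (j len : Nat) : Option (Nat × Bool) :=
  if j < len then
    if line.getD j "" = "#" then some (j, true)
    else if line.getD j "" = "O" then some (j, false)
    else scanA line (j + 1) len
  else none
termination_by len - j

-- cited by aLoop's decreasing_by
theorem scanA_le (line : List String) (j len p : Nat) (b : Bool)
    (h : scanA line j len = some (p, b)) : j ≤ p ∧ p < len := by
  unfold scanA at h
  split at h
  · split at h
    · injection h with h'; injection h' with h1 h2; omega
    · split at h
      · injection h with h'; injection h' with h1 h2; omega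
      · have := scanA_le line (j + 1) len p b h; omega
  · exact absurd h (by simp)
termination_by len - j

-- the outer `while target < length` loop over the state (line, target, looking)
def aLoop (line : List String) (len target looking : Nat) : List String :=
  if h : target < len then
    if line.getD target "" = "O" then aLoop line len (target + 1) looking
    else if line.getD target "" = "#" then aLoop line len (target + 1) looking
    else if line.getD target "" = "." then
      match hs : scanA line (max looking (target + 1)) len with
      | some (j, true) => aLoop line len (j + 1) j
      | some (j, false) =>
          aLoop ((line.set target (line.getD j "")).set j (line.getD target ""))
            len (target + 1) (j + 1)
      | none => line
    else aLoop line len (target + 1) looking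
  else line
termination_by len - target
decreasing_by
  · omega
  · omega
  · have := scanA_le line (max looking (target + 1)) len j true hs; omega
  · omega
  · omega

def compute_line_py (s : List String) : String :=
  PySem.Str.join "" (aLoop s s.length 0 0)

-- ===== PORT B =====
-- write out one buffered '#'-free segment: 'O'/'.' slots become n 'O's then '.'s, other
-- elements stay in place
def segWrite : List String → Nat → List String
  | [], _ => []
  | c :: cs, n =>
    if c = "O" ∨ c = "." then
      if 0 < n then "O" :: segWrite cs (n - 1) else "." :: segWrite cs n
    else c :: segWrite cs n

def countO (seg : List String) : Nat := seg.countP (fun c => c == "O")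

-- B's outer loop: split off the segment before the first '#', rewrite it, recurse
def fixAll (line : List String) : List String :=
  let seg := line.takeWhile (fun c => c ≠ "#")
  match _h : line.dropWhile (fun c => c ≠ "#") with
  | [] => segWrite seg (countO seg)
  | _ :: t => segWrite seg (countO seg) ++ "#" :: fixAll t
termination_by line.length
decreasing_by
  have h1 := List.length_dropWhile_le (fun c => c ≠ "#") line
  rw [_h] at h1
  simp at h1; omega

def compute_line_py_alt (s : List String) : String :=
  PySem.Str.join "" (fixAll s)

-- ===== PRECONDITION & SPEC =====
def Spec_compute_line_py (s : List String) (out : String) : Prop := out = compute_line_py_alt s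
instance (s : List String) (out : String) : Decidable (Spec_compute_line_py s out) := by unfold Spec_compute_line_py; infer_instance

-- ===== CLAIM (what is proved, stated in full; the proofs are below) =====
def Claim_equal_compute_line_py : Prop := ∀ (s : List String), Dom_compute_line_py s → Spec_compute_line_py s (compute_line_py s)

-- ===== LEMMAS AND PROOFS =====

theorem fixAll_of_drop_nil (l : List String) (h : l.dropWhile (fun c => c ≠ "#") = []) :
    fixAll l = segWrite (l.takeWhile (fun c => c ≠ "#")) (countO (l.takeWhile (fun c => c ≠ "#"))) := by
  rw [fixAll.eq_def]
  split
  · rfl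
  · rename_i heq; rw [h] at heq; exact absurd heq (by simp)

theorem fixAll_of_drop_cons (l t : List String) (x : String)
    (h : l.dropWhile (fun c => c ≠ "#") = x :: t) :
    fixAll l = segWrite (l.takeWhile (fun c => c ≠ "#")) (countO (l.takeWhile (fun c => c ≠ "#")))
      ++ "#" :: fixAll t := by
  rw [fixAll.eq_def]
  split
  · rename_i heq; rw [h] at heq; exact absurd heq (by simp)
  · rename_i head t' heq; rw [h] at heq; injection heq with h1 h2; rw [h2]

theorem fixAll_nil : fixAll [] = [] := by
  rw [fixAll_of_drop_nil [] (by simp)]; rfl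

theorem fixAll_hash (r : List String) : fixAll ("#" :: r) = "#" :: fixAll r := by
  rw [fixAll_of_drop_cons ("#"::r) r "#" (List.dropWhile_cons_of_neg (by simp))]
  simp [segWrite, countO]

theorem fixAll_cons_O (r : List String) : fixAll ("O" :: r) = "O" :: fixAll r := by
  have hpos : (fun c => decide (c ≠ "#")) "O" = true := by decide
  have htw := List.takeWhile_cons_of_pos (p := fun c => decide (c ≠ "#")) (a := "O") (l := r) hpos
  have hdw := List.dropWhile_cons_of_pos (p := fun c => decide (c ≠ "#")) (a := "O") (l := r) hpos
  cases hd : r.dropWhile (fun c => c ≠ "#") with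
  | nil =>
    rw [fixAll_of_drop_nil _ (hdw.trans hd), fixAll_of_drop_nil _ hd, htw]
    simp [segWrite, countO]
  | cons x t =>
    rw [fixAll_of_drop_cons _ _ _ (hdw.trans hd), fixAll_of_drop_cons _ _ _ hd, htw]
    simp [segWrite, countO]

theorem fixAll_cons_other (c : String) (r : List String)
    (h1 : c ≠ "#") (h2 : c ≠ "O") (h3 : c ≠ ".") :
    fixAll (c :: r) = c :: fixAll r := by
  have hpos : (fun x => decide (x ≠ "#")) c = true := by simp [h1]
  have htw := List.takeWhile_cons_of_pos (p := fun x => decide (x ≠ "#")) (a := c) (l := r) hpos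
  have hdw := List.dropWhile_cons_of_pos (p := fun x => decide (x ≠ "#")) (a := c) (l := r) hpos
  cases hd : r.dropWhile (fun x => x ≠ "#") with
  | nil =>
    rw [fixAll_of_drop_nil _ (hdw.trans hd), fixAll_of_drop_nil _ hd, htw]
    simp [segWrite, countO, h2, h3]
  | cons x t =>
    rw [fixAll_of_drop_cons _ _ _ (hdw.trans hd), fixAll_of_drop_cons _ _ _ hd, htw]
    simp [segWrite, countO, h2, h3]

theorem segWrite_zero_noO (l : List String) (h : ∀ c ∈ l, c ≠ "O") : segWrite l 0 = l := by
  induction l with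
  | nil => rfl
  | cons c cs ih =>
    have hc : c ≠ "O" := h c (by simp)
    unfold segWrite
    by_cases hd : c = "."
    · simp [hd, ih (fun x hx => h x (by simp [hx]))]
    · simp [hc, hd, ih (fun x hx => h x (by simp [hx]))]

theorem tw_all (u w : List String) (hu : ∀ c ∈ u, c ≠ "#") :
    (u ++ w).takeWhile (fun c => c ≠ "#") = u ++ w.takeWhile (fun c => c ≠ "#") := by
  induction u with
  | nil => rfl
  | cons a u ih =>
    rw [List.cons_append,
      List.takeWhile_cons_of_pos (by simp [hu a (by simp)]),
      ih (fun c hc => hu c (by simp [hc])), List.cons_append]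

theorem dw_all (u w : List String) (hu : ∀ c ∈ u, c ≠ "#") :
    (u ++ w).dropWhile (fun c => c ≠ "#") = w.dropWhile (fun c => c ≠ "#") := by
  induction u with
  | nil => rfl
  | cons a u ih =>
    rw [List.cons_append, List.dropWhile_cons_of_pos (by simp [hu a (by simp)]),
      ih (fun c hc => hu c (by simp [hc]))]

theorem countO_noO (u : List String) (hu : ∀ c ∈ u, c ≠ "O") : countO u = 0 := by
  unfold countO
  rw [List.countP_eq_zero]
  intro c hc
  simp [hu c hc]

theorem fixAll_no_rocks (l : List String) (h : ∀ c ∈ l, c ≠ "#" ∧ c ≠ "O") :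
    fixAll l = l := by
  have htw : l.takeWhile (fun c => c ≠ "#") = l := by
    rw [List.takeWhile_eq_self_iff.mpr]; intro c hc; simp [(h c hc).1]
  have hdw : l.dropWhile (fun c => c ≠ "#") = [] := by
    rw [List.dropWhile_eq_nil_iff.mpr]; intro c hc; simp [(h c hc).1]
  rw [fixAll_of_drop_nil l hdw, htw, countO_noO l (fun c hc => (h c hc).2),
    segWrite_zero_noO l (fun c hc => (h c hc).2)]

theorem segWrite_swap (u w : List String) (n : Nat) :
    segWrite (u ++ "O" :: w) n = segWrite (u ++ "." :: w) n := by
  induction u generalizing n with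
  | nil =>
    unfold segWrite
    simp only [List.nil_append]
    split_ifs <;> simp_all
  | cons c u ih =>
    unfold segWrite
    simp only [List.cons_append]
    split_ifs <;> simp [ih]

theorem segWrite_dot_succ (w : List String) (n : Nat) :
    segWrite ("." :: w) (n + 1) = "O" :: segWrite w n := by
  conv_lhs => rw [segWrite.eq_def]
  simp

theorem fixAll_dot_hash (u v : List String) (hu : ∀ c ∈ u, c ≠ "#" ∧ c ≠ "O") :
    fixAll ("." :: u ++ "#" :: v) = "." :: u ++ "#" :: fixAll v := by
  have hu1 : ∀ c ∈ ("." :: u), c ≠ "#" := by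
    intro c hc; rcases List.mem_cons.mp hc with h | h
    · simp [h]
    · exact (hu c h).1
  have htw : (("." :: u) ++ "#" :: v).takeWhile (fun c => c ≠ "#") = "." :: u := by
    rw [tw_all _ _ hu1, List.takeWhile_cons_of_neg (by simp), List.append_nil]
  have hdw : (("." :: u) ++ "#" :: v).dropWhile (fun c => c ≠ "#") = "#" :: v := by
    rw [dw_all _ _ hu1, List.dropWhile_cons_of_neg (by simp)]
  have hu2 : ∀ c ∈ ("." :: u), c ≠ "O" := by
    intro c hc
    rcases List.mem_cons.mp hc with h | h
    · simp [h]
    · exact (hu c h).2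
  rw [show ("." :: u ++ "#" :: v) = ("." :: u) ++ "#" :: v from rfl,
    fixAll_of_drop_cons _ _ _ hdw, htw, countO_noO _ hu2, segWrite_zero_noO _ hu2]

theorem fixAll_dot_O (u v : List String) (hu : ∀ c ∈ u, c ≠ "#" ∧ c ≠ "O") :
    fixAll ("." :: u ++ "O" :: v) = "O" :: fixAll (u ++ "." :: v) := by
  have hu1 : ∀ c ∈ ("." :: u), c ≠ "#" := by
    intro c hc; rcases List.mem_cons.mp hc with h | h
    · simp [h]
    · exact (hu c h).1
  have hu1' : ∀ c ∈ u, c ≠ "#" := fun c hc => (hu c hc).1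
  have hu0 : List.countP (fun c => c == "O") u = 0 :=
    List.countP_eq_zero.mpr (by intro a ha; simp [(hu a ha).2])
  have htwL : (("." :: u) ++ "O" :: v).takeWhile (fun c => c ≠ "#") =
      ("." :: u) ++ "O" :: v.takeWhile (fun c => c ≠ "#") := by
    rw [tw_all _ _ hu1, List.takeWhile_cons_of_pos (by simp)]
  have hdwL : (("." :: u) ++ "O" :: v).dropWhile (fun c => c ≠ "#") =
      v.dropWhile (fun c => c ≠ "#") := by
    rw [dw_all _ _ hu1, List.dropWhile_cons_of_pos (by simp)]
  have htwR : (u ++ "." :: v).takeWhile (fun c => c ≠ "#") =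
      u ++ "." :: v.takeWhile (fun c => c ≠ "#") := by
    rw [tw_all _ _ hu1', List.takeWhile_cons_of_pos (by simp)]
  have hdwR : (u ++ "." :: v).dropWhile (fun c => c ≠ "#") =
      v.dropWhile (fun c => c ≠ "#") := by
    rw [dw_all _ _ hu1', List.dropWhile_cons_of_pos (by simp)]
  have hcL : countO (("." :: u) ++ "O" :: v.takeWhile (fun c => c ≠ "#")) =
      countO (v.takeWhile (fun c => c ≠ "#")) + 1 := by
    simp [countO, hu0]
  have hcR : countO (u ++ "." :: v.takeWhile (fun c => c ≠ "#")) =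
      countO (v.takeWhile (fun c => c ≠ "#")) := by
    simp [countO, hu0]
  have hkey : segWrite (("." :: u) ++ "O" :: v.takeWhile (fun c => c ≠ "#"))
        (countO (v.takeWhile (fun c => c ≠ "#")) + 1) =
      "O" :: segWrite (u ++ "." :: v.takeWhile (fun c => c ≠ "#"))
        (countO (v.takeWhile (fun c => c ≠ "#"))) := by
    rw [List.cons_append, segWrite_dot_succ, segWrite_swap]
  cases hd : v.dropWhile (fun c => c ≠ "#") with
  | nil =>
    rw [show ("." :: u ++ "O" :: v) = ("." :: u) ++ "O" :: v from rfl,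
      fixAll_of_drop_nil _ (hdwL.trans hd), fixAll_of_drop_nil _ (hdwR.trans hd),
      htwL, htwR, hcL, hcR, hkey]
  | cons x t =>
    rw [show ("." :: u ++ "O" :: v) = ("." :: u) ++ "O" :: v from rfl,
      fixAll_of_drop_cons _ _ _ (hdwL.trans hd), fixAll_of_drop_cons _ _ _ (hdwR.trans hd),
      htwL, htwR, hcL, hcR, hkey]
    simp

theorem scanA_skip (line : List String) (l l' : Nat) (hle : l ≤ l') (hl : l' ≤ line.length)
    (hinv : ∀ k, l ≤ k → k < l' → line.getD k "" ≠ "#" ∧ line.getD k "" ≠ "O") :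
    scanA line l line.length = scanA line l' line.length := by
  rcases Nat.eq_or_lt_of_le hle with h | h
  · rw [h]
  · have hc := hinv l (le_refl _) h
    rw [scanA.eq_def, if_pos (by omega), if_neg hc.1, if_neg hc.2]
    exact scanA_skip line (l + 1) l' h hl (fun k hk1 hk2 => hinv k (by omega) hk2)
termination_by l' - l

theorem scanA_spec (line : List String) (j : Nat) :
    (match scanA line j line.length with
      | some (p, true) => ∃ u v, line.drop j = u ++ "#" :: v ∧ p = j + u.length ∧
          ∀ c ∈ u, c ≠ "#" ∧ c ≠ "O"
      | some (p, false) => ∃ u v, line.drop j = u ++ "O" :: v ∧ p = j + u.length ∧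
          ∀ c ∈ u, c ≠ "#" ∧ c ≠ "O"
      | none => ∀ c ∈ line.drop j, c ≠ "#" ∧ c ≠ "O") := by
  rw [scanA.eq_def]
  by_cases hj : j < line.length
  · have hdrop : line.drop j = line.getD j "" :: line.drop (j + 1) := by
      rw [List.getD_eq_getElem line "" hj]; exact List.drop_eq_getElem_cons hj
    rw [if_pos hj]
    by_cases h1 : line.getD j "" = "#"
    · rw [if_pos h1]
      exact ⟨[], line.drop (j + 1), by rw [hdrop, h1]; rfl, by simp, by simp⟩
    · rw [if_neg h1]
      by_cases h2 : line.getD j "" = "O"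
      · rw [if_pos h2]
        exact ⟨[], line.drop (j + 1), by rw [hdrop, h2]; rfl, by simp, by simp⟩
      · rw [if_neg h2]
        have ih := scanA_spec line (j + 1)
        cases hs : scanA line (j + 1) line.length with
        | none =>
          rw [hs] at ih
          intro c hc
          rw [hdrop] at hc
          rcases List.mem_cons.mp hc with h | h
          · rw [h]; exact ⟨h1, h2⟩
          · exact ih c h
        | some pb =>
          obtain ⟨p, b⟩ := pb
          rw [hs] at ih
          cases b with
          | true =>
            obtain ⟨u, v, hd, hp, hu⟩ := ih
            refine ⟨line.getD j "" :: u, v, ?_, ?_, ?_⟩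
            · rw [hdrop, hd]; rfl
            · simp [hp]; omega
            · intro c hc
              rcases List.mem_cons.mp hc with h | h
              · rw [h]; exact ⟨h1, h2⟩
              · exact hu c h
          | false =>
            obtain ⟨u, v, hd, hp, hu⟩ := ih
            refine ⟨line.getD j "" :: u, v, ?_, ?_, ?_⟩
            · rw [hdrop, hd]; rfl
            · simp [hp]; omega
            · intro c hc
              rcases List.mem_cons.mp hc with h | h
              · rw [h]; exact ⟨h1, h2⟩
              · exact hu c h
  · rw [if_neg hj]
    rw [List.drop_eq_nil_of_le (by omega)]
    simp
termination_by line.length - j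

theorem getD_append_cons (xs ys : List String) (y : String) :
    (xs ++ y :: ys).getD xs.length "" = y := by simp

theorem set_append_cons (xs ys : List String) (y a : String) :
    (xs ++ y :: ys).set xs.length a = xs ++ a :: ys := by simp

theorem getD_append_right' (xs ys : List String) (n : Nat) :
    (xs ++ ys).getD (xs.length + n) "" = ys.getD n "" := by
  simp [List.getD, List.getElem?_append_right]

theorem aLoop_eq (line : List String) (target looking : Nat)
    (hlk : looking ≤ line.length)
    (hinv : ∀ k, target < k → k < looking → line.getD k "" ≠ "#" ∧ line.getD k "" ≠ "O") :
    aLoop line line.length target looking = line.take target ++ fixAll (line.drop target) := by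
  rw [aLoop.eq_def]
  by_cases ht : target < line.length
  · rw [dif_pos ht]
    have hdrop : line.drop target = line.getD target "" :: line.drop (target + 1) := by
      rw [List.getD_eq_getElem line "" ht]; exact List.drop_eq_getElem_cons ht
    have htake : line.take (target + 1) = line.take target ++ [line.getD target ""] := by
      rw [List.getD_eq_getElem line "" ht]; exact List.take_succ_eq_append_getElem ht
    have hinv1 : ∀ k, target + 1 < k → k < looking → line.getD k "" ≠ "#" ∧ line.getD k "" ≠ "O" :=
      fun k a b => hinv k (by omega) b
    by_cases h1 : line.getD target "" = "O"
    · rw [if_pos h1, aLoop_eq line (target + 1) looking hlk hinv1, htake, hdrop, h1, fixAll_cons_O]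
      simp
    · rw [if_neg h1]
      by_cases h2 : line.getD target "" = "#"
      · rw [if_pos h2, aLoop_eq line (target + 1) looking hlk hinv1, htake, hdrop, h2, fixAll_hash]
        simp
      · rw [if_neg h2]
        by_cases h3 : line.getD target "" = "."
        · rw [if_pos h3]
          have hskip : scanA line (max looking (target + 1)) line.length
              = scanA line (target + 1) line.length := by
            refine (scanA_skip line (target + 1) (max looking (target + 1)) (by omega)
              (by omega) ?_).symm
            intro k hk1 hk2
            exact hinv k (by omega) (by omega)
          have hspec := scanA_spec line (target + 1)
          rw [hskip]
          cases hs : scanA line (target + 1) line.length with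
          | none =>
            rw [hs] at hspec
            show line = line.take target ++ fixAll (line.drop target)
            have hclean : ∀ c ∈ line.drop target, c ≠ "#" ∧ c ≠ "O" := by
              intro c hc
              rw [hdrop, h3] at hc
              rcases List.mem_cons.mp hc with h | h
              · rw [h]; exact ⟨by decide, by decide⟩
              · exact hspec c h
            rw [fixAll_no_rocks _ hclean, List.take_append_drop]
          | some pb =>
            obtain ⟨j, b⟩ := pb
            rw [hs] at hspec
            cases b with
            | true =>
              obtain ⟨u, v, hd, hp, hu⟩ := hspec
              show aLoop line line.length (j + 1) j
                = line.take target ++ fixAll (line.drop target)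
              have hlen2 : line.length = (target + 1) + (u.length + 1 + v.length) := by
                have := congrArg List.length hd
                simp only [List.length_drop, List.length_append, List.length_cons] at this
                omega
              rw [aLoop_eq line (j + 1) j (by omega)
                (by intro k a b; exact absurd (a.trans b) (by omega))]
              have hdj : line.drop (j + 1) = v := by
                have e : line.drop (j + 1) = (line.drop (target + 1)).drop (u.length + 1) := by
                  rw [List.drop_drop]; congr 1; omega
                rw [e, hd, show u ++ "#" :: v = (u ++ ["#"]) ++ v by simp,
                  List.drop_left' (by simp)]
              have htj : line.take (j + 1) = (line.take target ++ "." :: u) ++ ["#"] := by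
                have e : j + 1 = target + (u.length + 2) := by omega
                rw [e, List.take_add, hdrop, h3, List.take_succ_cons, hd,
                  show u ++ "#" :: v = (u ++ ["#"]) ++ v by simp, List.take_left' (by simp)]
                simp
              rw [htj, hdj, hdrop, h3, hd,
                show ("." :: (u ++ "#" :: v)) = ("." :: u ++ "#" :: v) from rfl,
                fixAll_dot_hash u v hu]
              simp
            | false =>
              obtain ⟨u, v, hd, hp, hu⟩ := hspec
              show aLoop ((line.set target (line.getD j "")).set j (line.getD target ""))
                  line.length (target + 1) (j + 1)
                = line.take target ++ fixAll (line.drop target)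
              obtain ⟨P, hP⟩ : ∃ P, line.take target = P := ⟨_, rfl⟩
              have hlen2 : line.length = (target + 1) + (u.length + 1 + v.length) := by
                have := congrArg List.length hd
                simp only [List.length_drop, List.length_append, List.length_cons] at this
                omega
              have hPlen : P.length = target := by
                rw [← hP]; simp; omega
              have hline : line = P ++ "." :: (u ++ "O" :: v) := by
                conv_lhs => rw [← List.take_append_drop target line]
                rw [hdrop, h3, hd, hP]
              have hgj : line.getD j "" = "O" := by
                conv_lhs => rw [hline]
                rw [show P ++ "." :: (u ++ "O" :: v) = (P ++ "." :: u) ++ "O" :: v by simp,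
                  show j = (P ++ "." :: u).length by simp [hPlen]; omega,
                  getD_append_cons]
              have hset1 : (P ++ "." :: (u ++ "O" :: v)).set target "O"
                  = P ++ "O" :: (u ++ "O" :: v) := by
                rw [show target = P.length from hPlen.symm]
                exact set_append_cons _ _ _ _
              have hline' : (line.set target (line.getD j "")).set j (line.getD target "")
                  = (P ++ ["O"]) ++ (u ++ "." :: v) := by
                rw [hgj, h3]
                conv_lhs => rw [hline]
                rw [hset1,
                  show P ++ "O" :: (u ++ "O" :: v) = (P ++ "O" :: u) ++ "O" :: v by simp,
                  show j = (P ++ "O" :: u).length by simp [hPlen]; omega,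
                  set_append_cons]
                simp
              rw [hline']
              have hlen' : ((P ++ ["O"]) ++ (u ++ "." :: v)).length = line.length := by
                simp [hPlen]; omega
              rw [show line.length = ((P ++ ["O"]) ++ (u ++ "." :: v)).length
                from hlen'.symm]
              rw [aLoop_eq ((P ++ ["O"]) ++ (u ++ "." :: v)) (target + 1) (j + 1)
                (by simp [hPlen]; omega)
                (by
                  intro k a b
                  have hPO : (P ++ ["O"]).length = target + 1 := by simp [hPlen]
                  have hk : k = (P ++ ["O"]).length + (k - (target + 1)) := by
                    rw [hPO]; omega
                  rw [hk, getD_append_right']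
                  by_cases hi : k - (target + 1) < u.length
                  · have e : (u ++ "." :: v).getD (k - (target + 1)) ""
                        = u.getD (k - (target + 1)) "" := by
                      simp [List.getD, List.getElem?_append_left hi]
                    rw [e, List.getD_eq_getElem u "" hi]
                    exact hu _ (List.getElem_mem hi)
                  · have e : k - (target + 1) = u.length := by
                      rw [hPO] at hk; omega
                    rw [e, getD_append_cons]
                    exact ⟨by decide, by decide⟩)]
              rw [List.take_left' (by simp [hPlen]), List.drop_left' (by simp [hPlen])]
              conv_rhs => rw [hdrop, h3, hd, hP]
              rw [show ("." :: (u ++ "O" :: v)) = ("." :: u ++ "O" :: v) from rfl,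
                fixAll_dot_O u v hu]
              simp
        · rw [if_neg h3, aLoop_eq line (target + 1) looking hlk hinv1, htake, hdrop,
            fixAll_cons_other _ _ h2 h1 h3]
          simp
  · rw [dif_neg ht, List.take_of_length_le (by omega), List.drop_eq_nil_of_le (by omega),
      fixAll_nil, List.append_nil]
termination_by line.length - target
decreasing_by
  · omega
  · omega
  · omega
  · omega
  · omega

-- ===== VERDICT (by name: the statement is the Claim_ definition above) =====
theorem compute_line_py_spec : Claim_equal_compute_line_py := by
  intro s _
  unfold Spec_compute_line_py compute_line_py compute_line_py_alt
  rw [aLoop_eq s 0 0 (by omega) (by intro k a b; exact absurd (a.trans b) (by omega))]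
  simp
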